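-- pv_equiv track=rewrite | github.com/thelollipopman/thelollipopman | chessengine2h.py | bishop_attacks_on_the_fly
-- ===== SOURCE A (Python) =====
-- def bishop_attacks_on_the_fly(square, block):
--     rank, file = square // 8, square % 8
--     attacks = 0
--     for r, f in zip(range(rank + 1, 8), range(file + 1, 8)):
--         attacks |= 1 << (r * 8 + f)
--         if block & (1 << (r * 8 + f)):
--             break
--     for r, f in zip(range(rank - 1, -1, -1), range(file - 1, -1, -1)):
--         attacks |= 1 << (r * 8 + f)
--         if block & (1 << (r * 8 + f)):
--             break
--     for r, f in zip(range(rank + 1, 8), range(file - 1, -1, -1)):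
--         attacks |= 1 << (r * 8 + f)
--         if block & (1 << (r * 8 + f)):
--             break
--     for r, f in zip(range(rank - 1, -1, -1), range(file + 1, 8)):
--         attacks |= 1 << (r * 8 + f)
--         if block & (1 << (r * 8 + f)):
--             break
--     return attacks
-- ===== SOURCE B (Python) =====
-- def bishop_attacks_on_the_fly(square, block):
--     rank, file = divmod(square, 8)
--     attacks = 0
--     for step, n in ((9, min(7 - rank, 7 - file)),
--                     (-9, min(rank, file)),
--                     (7, min(7 - rank, file)),
--                     (-7, min(rank, 7 - file))):
--         # walk the ray back-to-front (far end first); a blocker square resets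
--         # the mask, so only the squares from `square` up to and including the
--         # first blocker survive -- no break needed
--         m = 0
--         for k in range(n, 0, -1):
--             bit = 1 << (square + step * k)
--             m = bit if block & bit else m | bit
--         attacks |= m
--     return attacks
-- ===== Notes on version B (the rewrite author's own statement) =====
-- stated objective: alternative
-- what changed: B scans each diagonal ray BACKWARDS (from its closed-form far end, range(n,0,-1)) with a reset-on-blocker accumulator (m = bit if blocked else m|bit), so the first blocker is handled by wiping the mask instead of A's forward break-on-blocker walks over zipped rank/file ranges.
import Mathlib
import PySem

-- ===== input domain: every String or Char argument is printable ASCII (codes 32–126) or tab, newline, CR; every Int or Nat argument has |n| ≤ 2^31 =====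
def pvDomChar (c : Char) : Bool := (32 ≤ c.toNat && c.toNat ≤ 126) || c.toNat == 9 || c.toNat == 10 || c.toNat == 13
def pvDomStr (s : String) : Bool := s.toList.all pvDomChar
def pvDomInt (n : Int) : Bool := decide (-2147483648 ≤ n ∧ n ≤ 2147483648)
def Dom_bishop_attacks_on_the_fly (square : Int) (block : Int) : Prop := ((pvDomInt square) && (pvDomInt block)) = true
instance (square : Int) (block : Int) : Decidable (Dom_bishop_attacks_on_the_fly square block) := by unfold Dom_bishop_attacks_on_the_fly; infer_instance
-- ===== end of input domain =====

-- B walks each diagonal ray BACKWARDS (far end first, closed-form ray length) with a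
-- reset-on-blocker accumulator instead of A's four forward break-on-blocker walks;
-- objective: alternative (same O(1) cost, different traversal).

-- ===== PORT A =====
-- One helper per Python loop; fuel 8 is a totality guard only (each zipped range yields at
-- most 8 pairs, since file = square % 8 lies in 0..7).
-- loop 1: for r, f in zip(range(rank+1, 8), range(file+1, 8))
def loopA1 (block : Int) : Nat → Int → Int → Int → Int
  | 0, _, _, acc => acc
  | fuel+1, r, f, acc =>
    if r < 8 ∧ f < 8 then
      let acc' := PySem.Int.bor acc ((1 : Int) <<< (r * 8 + f).toNat)
      if PySem.Int.band block ((1 : Int) <<< (r * 8 + f).toNat) ≠ 0 then acc'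
      else loopA1 block fuel (r + 1) (f + 1) acc'
    else acc

-- loop 2: for r, f in zip(range(rank-1, -1, -1), range(file-1, -1, -1))
def loopA2 (block : Int) : Nat → Int → Int → Int → Int
  | 0, _, _, acc => acc
  | fuel+1, r, f, acc =>
    if r > -1 ∧ f > -1 then
      let acc' := PySem.Int.bor acc ((1 : Int) <<< (r * 8 + f).toNat)
      if PySem.Int.band block ((1 : Int) <<< (r * 8 + f).toNat) ≠ 0 then acc'
      else loopA2 block fuel (r - 1) (f - 1) acc'
    else acc

-- loop 3: for r, f in zip(range(rank+1, 8), range(file-1, -1, -1))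
def loopA3 (block : Int) : Nat → Int → Int → Int → Int
  | 0, _, _, acc => acc
  | fuel+1, r, f, acc =>
    if r < 8 ∧ f > -1 then
      let acc' := PySem.Int.bor acc ((1 : Int) <<< (r * 8 + f).toNat)
      if PySem.Int.band block ((1 : Int) <<< (r * 8 + f).toNat) ≠ 0 then acc'
      else loopA3 block fuel (r + 1) (f - 1) acc'
    else acc

-- loop 4: for r, f in zip(range(rank-1, -1, -1), range(file+1, 8))
def loopA4 (block : Int) : Nat → Int → Int → Int → Int
  | 0, _, _, acc => acc
  | fuel+1, r, f, acc =>
    if r > -1 ∧ f < 8 then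
      let acc' := PySem.Int.bor acc ((1 : Int) <<< (r * 8 + f).toNat)
      if PySem.Int.band block ((1 : Int) <<< (r * 8 + f).toNat) ≠ 0 then acc'
      else loopA4 block fuel (r - 1) (f + 1) acc'
    else acc

def bishop_attacks_on_the_fly (square : Int) (block : Int) : Int :=
  let rank := PySem.Int.floordiv square 8
  let file := PySem.Int.mod square 8
  loopA4 block 8 (rank - 1) (file + 1)
    (loopA3 block 8 (rank + 1) (file - 1)
      (loopA2 block 8 (rank - 1) (file - 1)
        (loopA1 block 8 (rank + 1) (file + 1) 0)))

-- ===== PORT B =====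
-- Source B: for each (step, n) the ray is scanned back-to-front over range(n, 0, -1);
-- a blocker square RESETS the mask (bit if block & bit else m | bit), so only the
-- squares up to and including the first blocker survive — no break.
def bishop_attacks_on_the_fly_alt (square : Int) (block : Int) : Int :=
  let rank := PySem.Int.floordiv square 8
  let file := PySem.Int.mod square 8
  [((9 : Int), min (7 - rank) (7 - file)),
   ((-9 : Int), min rank file),
   ((7 : Int), min (7 - rank) file),
   ((-7 : Int), min rank (7 - file))].foldl
    (fun attacks sn =>
      let m := (PySem.List.pyRange sn.2 0 (-1)).foldl
        (fun m k =>
          let bit := (1 : Int) <<< (square + sn.1 * k).toNat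
          if PySem.Int.band block bit ≠ 0 then bit else PySem.Int.bor m bit) 0
      PySem.Int.bor attacks m) 0

-- ===== PRECONDITION & SPEC =====
-- Pre_ excludes squares below -8 (rank ≤ -2), on which Python A raises ValueError: its
-- ascending ray loops reach a negative shift amount 1 << (r*8+f).
def Pre_bishop_attacks_on_the_fly (square : Int) (block : Int) : Prop := -8 ≤ square
instance (square : Int) (block : Int) : Decidable (Pre_bishop_attacks_on_the_fly square block) := by unfold Pre_bishop_attacks_on_the_fly; infer_instance
def pvWitness_bishop_attacks_on_the_fly : Int × Int := (28, 262144)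

def Spec_bishop_attacks_on_the_fly (square : Int) (block : Int) (out : Int) : Prop := out = bishop_attacks_on_the_fly_alt square block
instance (square : Int) (block : Int) (out : Int) : Decidable (Spec_bishop_attacks_on_the_fly square block out) := by unfold Spec_bishop_attacks_on_the_fly; infer_instance

-- ===== CLAIM (what is proved, stated in full; the proofs are below) =====
def Claim_equal_bishop_attacks_on_the_fly : Prop := ∀ (square : Int) (block : Int), Dom_bishop_attacks_on_the_fly square block → Pre_bishop_attacks_on_the_fly square block → Spec_bishop_attacks_on_the_fly square block (bishop_attacks_on_the_fly square block)

-- ===== LEMMAS AND PROOFS =====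

-- Proof-layer model of one forward break-on-blocker walk (what each of A's loops does
-- along a ray, indexed by the square number and a step of ±7/±9).
def rayB (block step : Int) : Nat → Int → Int → Int
  | 0, _, acc => acc
  | n+1, sq, acc =>
    let sq' := sq + step
    let acc' := PySem.Int.bor acc ((1 : Int) <<< sq'.toNat)
    if PySem.Int.band block ((1 : Int) <<< sq'.toNat) ≠ 0 then acc'
    else rayB block step n sq' acc'

-- The mask a ray contributes: bits sq+step, …, sq+step*n, cut at (and including) the
-- first blocker.
def mskRay (block step : Int) : Int → Nat → Int
  | _, 0 => 0
  | sq, n+1 =>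
    let bit := (1 : Int) <<< (sq + step).toNat
    if PySem.Int.band block bit ≠ 0 then bit
    else PySem.Int.bor bit (mskRay block step (sq + step) n)

-- Is any of the n ray squares a blocker?
def anyBlk (block step : Int) : Int → Nat → Bool
  | _, 0 => false
  | sq, n+1 =>
    (decide (PySem.Int.band block ((1 : Int) <<< (sq + step).toNat) ≠ 0))
      || anyBlk block step (sq + step) n

lemma shl_nonneg (k : Nat) : (0 : Int) ≤ (1 : Int) <<< k := by
  simp [Int.shiftLeft_eq]

lemma bor_nonneg {a b : Int} (ha : 0 ≤ a) (hb : 0 ≤ b) : 0 ≤ PySem.Int.bor a b := by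
  rw [PySem.Int.bor_of_nonneg ha hb]; exact Int.natCast_nonneg _

lemma zero_bor (a : Int) : PySem.Int.bor 0 a = a := by
  rw [PySem.Int.bor_comm]; exact PySem.Int.bor_zero a

lemma bor_assoc_nonneg {a b c : Int} (ha : 0 ≤ a) (hb : 0 ≤ b) (hc : 0 ≤ c) :
    PySem.Int.bor (PySem.Int.bor a b) c = PySem.Int.bor a (PySem.Int.bor b c) := by
  rw [PySem.Int.bor_of_nonneg ha hb, PySem.Int.bor_of_nonneg hb hc,
      PySem.Int.bor_of_nonneg (Int.natCast_nonneg _) hc,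
      PySem.Int.bor_of_nonneg ha (Int.natCast_nonneg _)]
  simp [Nat.lor_assoc]

lemma mskRay_nonneg (block step : Int) : ∀ (n : Nat) (sq : Int), 0 ≤ mskRay block step sq n := by
  intro n
  induction n with
  | zero => intro sq; simp [mskRay]
  | succ n ih =>
    intro sq
    simp only [mskRay]
    split_ifs
    · exact shl_nonneg _
    · exact bor_nonneg (shl_nonneg _) (ih _)

-- A's forward break walk is: old accumulator OR the ray mask.
lemma rayB_eq_msk (block step : Int) : ∀ (n : Nat) (sq acc : Int), 0 ≤ acc →
    rayB block step n sq acc = PySem.Int.bor acc (mskRay block step sq n) := by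
  intro n
  induction n with
  | zero => intro sq acc _; simp [rayB, mskRay]
  | succ n ih =>
    intro sq acc hacc
    simp only [rayB, mskRay]
    split_ifs with hblk
    · rfl
    · rw [ih (sq + step) _ (bor_nonneg hacc (shl_nonneg _)),
          bor_assoc_nonneg hacc (shl_nonneg _) (mskRay_nonneg block step n (sq + step))]

-- one-step unfoldings (mskRay/anyBlk unfold twice under simp at n+2; these control it)
lemma mskRay_succ (block step sq : Int) (n : Nat) :
    mskRay block step sq (n+1)
      = (if PySem.Int.band block ((1 : Int) <<< (sq + step).toNat) ≠ 0
          then (1 : Int) <<< (sq + step).toNat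
          else PySem.Int.bor ((1 : Int) <<< (sq + step).toNat) (mskRay block step (sq + step) n)) := rfl

lemma anyBlk_succ (block step sq : Int) (n : Nat) :
    anyBlk block step sq (n+1)
      = ((decide (PySem.Int.band block ((1 : Int) <<< (sq + step).toNat) ≠ 0))
          || anyBlk block step (sq + step) n) := rfl

-- peel anyBlk at the FAR end
lemma anyBlk_snoc (block step : Int) : ∀ (n : Nat) (sq : Int),
    anyBlk block step sq (n+1)
      = (anyBlk block step sq n
          || decide (PySem.Int.band block ((1 : Int) <<< (sq + step * ((n : Int) + 1)).toNat) ≠ 0)) := by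
  intro n
  induction n with
  | zero => intro sq; simp [anyBlk]
  | succ n ih =>
    intro sq
    rw [anyBlk_succ block step sq (n+1), ih (sq + step),
        show sq + step + step * ((n : Int) + 1) = sq + step * (((n : Nat) + 1 : Int) + 1) by ring,
        anyBlk_succ block step sq n, Bool.or_assoc]
    norm_cast

-- once a blocker has been seen, a longer ray contributes the same mask
lemma mskRay_stable (block step : Int) : ∀ (n : Nat) (sq : Int),
    anyBlk block step sq n = true → mskRay block step sq (n+1) = mskRay block step sq n := by
  intro n
  induction n with
  | zero => intro sq h; simp [anyBlk] at h
  | succ n ih =>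
    intro sq h
    simp only [anyBlk_succ, Bool.or_eq_true, decide_eq_true_eq] at h
    rw [mskRay_succ block step sq (n+1), mskRay_succ block step sq n]
    rcases h with h | h
    · simp [h]
    · split_ifs with hblk
      · rfl
      · rw [ih (sq + step) h]

-- with no blocker among the first n squares, extending the ray ORs in the far bit
lemma mskRay_snoc (block step : Int) : ∀ (n : Nat) (sq : Int),
    anyBlk block step sq n = false →
    mskRay block step sq (n+1)
      = PySem.Int.bor (mskRay block step sq n) ((1 : Int) <<< (sq + step * ((n : Int) + 1)).toNat) := by
  intro n
  induction n with
  | zero =>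
    intro sq _
    simp only [Nat.cast_zero, zero_add, mul_one]
    rw [mskRay_succ block step sq 0]
    split_ifs with hblk
    · simp [mskRay, zero_bor]
    · simp [mskRay, zero_bor]
  | succ n ih =>
    intro sq h
    simp only [anyBlk_succ, Bool.or_eq_false_iff, decide_eq_false_iff_not, not_not] at h
    have hc : ¬ PySem.Int.band block ((1 : Int) <<< (sq + step).toNat) ≠ 0 := fun hcc => hcc h.1
    rw [mskRay_succ block step sq (n+1), mskRay_succ block step sq n, if_neg hc, if_neg hc,
        ih (sq + step) h.2,
        show sq + step + step * ((n : Int) + 1) = sq + step * (((n : Nat) + 1 : Int) + 1) by ring,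
        bor_assoc_nonneg (shl_nonneg _) (mskRay_nonneg block step n (sq + step)) (shl_nonneg _)]
    norm_cast

-- B's backwards reset-on-blocker scan computes exactly the ray mask.
lemma foldl_desc_none (block step square : Int) : ∀ (n : Nat) (acc : Int), 0 ≤ acc →
    anyBlk block step square n = false →
    (PySem.List.pyRange (n : Int) 0 (-1)).foldl
      (fun m k =>
        let bit := (1 : Int) <<< (square + step * k).toNat
        if PySem.Int.band block bit ≠ 0 then bit else PySem.Int.bor m bit) acc
    = PySem.Int.bor acc (mskRay block step square n) := by
  intro n
  induction n with
  | zero =>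
    intro acc _ _
    rw [PySem.List.pyRange_neg_one_eq_nil (by norm_num)]
    simp [mskRay]
  | succ n ih =>
    intro acc hacc h
    rw [anyBlk_snoc block step n square, Bool.or_eq_false_iff] at h
    obtain ⟨hany, hblk⟩ := h
    rw [decide_eq_false_iff_not, not_not] at hblk
    have hc : ¬ PySem.Int.band block ((1 : Int) <<< (square + step * ((n : Int) + 1)).toNat) ≠ 0 :=
      fun hcc => hcc hblk
    rw [show ((n + 1 : Nat) : Int) = (n : Int) + 1 by push_cast; ring,
        PySem.List.pyRange_neg_one_cons (by positivity),
        show (n : Int) + 1 - 1 = (n : Int) by ring,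
        List.foldl_cons]
    dsimp only
    rw [if_neg hc, ih _ (bor_nonneg hacc (shl_nonneg _)) hany, mskRay_snoc block step n square hany,
        bor_assoc_nonneg hacc (shl_nonneg _) (mskRay_nonneg block step n square),
        PySem.Int.bor_comm ((1 : Int) <<< (square + step * ((n : Int) + 1)).toNat)
          (mskRay block step square n)]

-- the same scan once a blocker occurs: the old accumulator is wiped
lemma foldl_desc_any (block step square : Int) : ∀ (n : Nat) (acc : Int),
    anyBlk block step square n = true →
    (PySem.List.pyRange (n : Int) 0 (-1)).foldl
      (fun m k =>
        let bit := (1 : Int) <<< (square + step * k).toNat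
        if PySem.Int.band block bit ≠ 0 then bit else PySem.Int.bor m bit) acc
    = mskRay block step square n := by
  intro n
  induction n with
  | zero => intro acc h; simp [anyBlk] at h
  | succ n ih =>
    intro acc h
    rw [show ((n + 1 : Nat) : Int) = (n : Int) + 1 by push_cast; ring,
        PySem.List.pyRange_neg_one_cons (by positivity),
        show (n : Int) + 1 - 1 = (n : Int) by ring,
        List.foldl_cons]
    dsimp only
    rw [anyBlk_snoc block step n square, Bool.or_eq_true, decide_eq_true_eq] at h
    by_cases hblk : PySem.Int.band block ((1 : Int) <<< (square + step * ((n : Int) + 1)).toNat) ≠ 0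
    · rw [if_pos hblk]
      by_cases hany : anyBlk block step square n = true
      · rw [ih _ hany]
        exact (mskRay_stable block step n square hany).symm
      · rw [Bool.not_eq_true] at hany
        rw [foldl_desc_none block step square n _ (shl_nonneg _) hany, mskRay_snoc block step n square hany]
        exact PySem.Int.bor_comm _ _
    · have hany : anyBlk block step square n = true := by tauto
      rw [if_neg hblk, ih _ hany]
      exact (mskRay_stable block step n square hany).symm

-- one ray of B, with its Int length (empty when n ≤ 0)
lemma rayAlt_eq_mskRay (block step square : Int) (n : Int) :
    (PySem.List.pyRange n 0 (-1)).foldl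
      (fun m k =>
        let bit := (1 : Int) <<< (square + step * k).toNat
        if PySem.Int.band block bit ≠ 0 then bit else PySem.Int.bor m bit) 0
    = mskRay block step square n.toNat := by
  by_cases h : n ≤ 0
  · rw [PySem.List.pyRange_neg_one_eq_nil h, show n.toNat = 0 by omega]
    simp [mskRay]
  · rw [show n = ((n.toNat : Nat) : Int) by omega]
    by_cases hany : anyBlk block step square n.toNat = true
    · exact foldl_desc_any block step square n.toNat 0 hany
    · rw [Bool.not_eq_true] at hany
      rw [foldl_desc_none block step square n.toNat 0 le_rfl hany, zero_bor, Int.toNat_natCast]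

lemma loopA1_eq_rayB (block : Int) : ∀ (fuel n : Nat) (r f sq acc : Int),
    sq + 9 = r * 8 + f → n = (min (8 - r) (8 - f)).toNat → n ≤ fuel →
    loopA1 block fuel r f acc = rayB block 9 n sq acc := by
  intro fuel
  induction fuel with
  | zero =>
    intro n r f sq acc hsq hn hle
    have h0 : n = 0 := by omega
    subst h0
    simp [loopA1, rayB]
  | succ fuel ih =>
    intro n r f sq acc hsq hn hle
    by_cases hc : r < 8 ∧ f < 8
    · obtain ⟨m, rfl⟩ : ∃ m, n = m + 1 := ⟨n - 1, by omega⟩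
      simp only [loopA1, rayB, if_pos hc]
      rw [show sq + 9 = r * 8 + f from hsq]
      split_ifs with hblk
      · rfl
      · exact ih m (r + 1) (f + 1) (r * 8 + f) _ (by ring) (by omega) (by omega)
    · have h0 : n = 0 := by omega
      subst h0
      simp [loopA1, rayB, hc]

lemma loopA2_eq_rayB (block : Int) : ∀ (fuel n : Nat) (r f sq acc : Int),
    sq - 9 = r * 8 + f → n = (min (r + 1) (f + 1)).toNat → n ≤ fuel →
    loopA2 block fuel r f acc = rayB block (-9) n sq acc := by
  intro fuel
  induction fuel with
  | zero =>
    intro n r f sq acc hsq hn hle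
    have h0 : n = 0 := by omega
    subst h0
    simp [loopA2, rayB]
  | succ fuel ih =>
    intro n r f sq acc hsq hn hle
    by_cases hc : r > -1 ∧ f > -1
    · obtain ⟨m, rfl⟩ : ∃ m, n = m + 1 := ⟨n - 1, by omega⟩
      simp only [loopA2, rayB, if_pos hc]
      rw [show sq + -9 = r * 8 + f by omega]
      split_ifs with hblk
      · rfl
      · exact ih m (r - 1) (f - 1) (r * 8 + f) _ (by omega) (by omega) (by omega)
    · have h0 : n = 0 := by omega
      subst h0
      simp [loopA2, rayB, hc]

lemma loopA3_eq_rayB (block : Int) : ∀ (fuel n : Nat) (r f sq acc : Int),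
    sq + 7 = r * 8 + f → n = (min (8 - r) (f + 1)).toNat → n ≤ fuel →
    loopA3 block fuel r f acc = rayB block 7 n sq acc := by
  intro fuel
  induction fuel with
  | zero =>
    intro n r f sq acc hsq hn hle
    have h0 : n = 0 := by omega
    subst h0
    simp [loopA3, rayB]
  | succ fuel ih =>
    intro n r f sq acc hsq hn hle
    by_cases hc : r < 8 ∧ f > -1
    · obtain ⟨m, rfl⟩ : ∃ m, n = m + 1 := ⟨n - 1, by omega⟩
      simp only [loopA3, rayB, if_pos hc]
      rw [show sq + 7 = r * 8 + f from hsq]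
      split_ifs with hblk
      · rfl
      · exact ih m (r + 1) (f - 1) (r * 8 + f) _ (by omega) (by omega) (by omega)
    · have h0 : n = 0 := by omega
      subst h0
      simp [loopA3, rayB, hc]

lemma loopA4_eq_rayB (block : Int) : ∀ (fuel n : Nat) (r f sq acc : Int),
    sq - 7 = r * 8 + f → n = (min (r + 1) (8 - f)).toNat → n ≤ fuel →
    loopA4 block fuel r f acc = rayB block (-7) n sq acc := by
  intro fuel
  induction fuel with
  | zero =>
    intro n r f sq acc hsq hn hle
    have h0 : n = 0 := by omega
    subst h0
    simp [loopA4, rayB]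
  | succ fuel ih =>
    intro n r f sq acc hsq hn hle
    by_cases hc : r > -1 ∧ f < 8
    · obtain ⟨m, rfl⟩ : ∃ m, n = m + 1 := ⟨n - 1, by omega⟩
      simp only [loopA4, rayB, if_pos hc]
      rw [show sq + -7 = r * 8 + f by omega]
      split_ifs with hblk
      · rfl
      · exact ih m (r - 1) (f + 1) (r * 8 + f) _ (by omega) (by omega) (by omega)
    · have h0 : n = 0 := by omega
      subst h0
      simp [loopA4, rayB, hc]

-- ===== VERDICT (by name: the statement is the Claim_ definition above) =====
theorem bishop_attacks_on_the_fly_spec : Claim_equal_bishop_attacks_on_the_fly := by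
  intro square block _ _
  unfold Spec_bishop_attacks_on_the_fly bishop_attacks_on_the_fly bishop_attacks_on_the_fly_alt
  dsimp only
  have hf0 : 0 ≤ PySem.Int.mod square 8 := PySem.Int.mod_nonneg square (by norm_num)
  have hf8 : PySem.Int.mod square 8 < 8 := PySem.Int.mod_lt square (by norm_num)
  have hid : PySem.Int.floordiv square 8 * 8 + PySem.Int.mod square 8 = square :=
    PySem.Int.floordiv_mul_add_mod square 8
  set rank := PySem.Int.floordiv square 8 with hrank
  set file := PySem.Int.mod square 8 with hfile
  rw [loopA1_eq_rayB block 8 ((min (7 - rank) (7 - file)).toNat) (rank + 1) (file + 1) square 0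
        (by omega) (by omega) (by omega),
      loopA2_eq_rayB block 8 ((min rank file).toNat) (rank - 1) (file - 1) square _
        (by omega) (by omega) (by omega),
      loopA3_eq_rayB block 8 ((min (7 - rank) file).toNat) (rank + 1) (file - 1) square _
        (by omega) (by omega) (by omega),
      loopA4_eq_rayB block 8 ((min rank (7 - file)).toNat) (rank - 1) (file + 1) square _
        (by omega) (by omega) (by omega)]
  simp only [List.foldl_cons, List.foldl_nil]
  rw [rayAlt_eq_mskRay block 9 square, rayAlt_eq_mskRay block (-9) square,
      rayAlt_eq_mskRay block 7 square, rayAlt_eq_mskRay block (-7) square]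
  have h1 : 0 ≤ PySem.Int.bor 0 (mskRay block 9 square (min (7 - rank) (7 - file)).toNat) :=
    bor_nonneg le_rfl (mskRay_nonneg _ _ _ _)
  have h2 : 0 ≤ PySem.Int.bor _ (mskRay block (-9) square (min rank file).toNat) :=
    bor_nonneg h1 (mskRay_nonneg _ _ _ _)
  have h3 : 0 ≤ PySem.Int.bor _ (mskRay block 7 square (min (7 - rank) file).toNat) :=
    bor_nonneg h2 (mskRay_nonneg _ _ _ _)
  rw [rayB_eq_msk block 9 _ square 0 le_rfl,
      rayB_eq_msk block (-9) _ square _ h1,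
      rayB_eq_msk block 7 _ square _ h2,
      rayB_eq_msk block (-7) _ square _ h3]
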